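-- pv_equiv track=rewrite | github.com/ucphhpc/gen-vm-image | gen_vm_image/cli/helpers.py | extract_arguments
-- ===== SOURCE A (Python) =====
-- def get_arguments(arguments, startswith=""):
--     return {k: v for k, v in arguments.items() if k.startswith(startswith)}
--
-- def extract_arguments(arguments, argument_groups):
--     found_kwargs, remaining_kwargs = {}, {}
--     for argument_group in argument_groups:
--         group_args = get_arguments(arguments, argument_group.lower())
--         found_kwargs.update(group_args)
--     remaining_kwargs = {
--         k: v for k, v in arguments.items() if k not in found_kwargs and v
--     }
--     return found_kwargs, remaining_kwargs
-- ===== SOURCE B (Python) =====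
-- def extract_arguments(arguments, argument_groups):
--     prefixes = [g.lower() for g in argument_groups]
--     buckets = [[] for _ in prefixes]
--     remaining_kwargs = {}
--     for k, v in arguments.items():
--         for i, p in enumerate(prefixes):
--             if k.startswith(p):
--                 buckets[i].append((k, v))
--                 break
--         else:
--             if v:
--                 remaining_kwargs[k] = v
--     found_kwargs = {}
--     for bucket in buckets:
--         found_kwargs.update(bucket)
--     return found_kwargs, remaining_kwargs
-- ===== Notes on version B (the rewrite author's own statement) =====
-- stated objective: alternative
-- what changed: A scans all arguments once per group (G filter passes merged into found_kwargs) plus a final pass for the rest; B makes a single pass over arguments, bucketing each item by its first matching group (with an early break) or into remaining_kwargs, then concatenates the buckets - a bucket-sort by first-matching-group index that reproduces A's group-major insertion order.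
import Mathlib
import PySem

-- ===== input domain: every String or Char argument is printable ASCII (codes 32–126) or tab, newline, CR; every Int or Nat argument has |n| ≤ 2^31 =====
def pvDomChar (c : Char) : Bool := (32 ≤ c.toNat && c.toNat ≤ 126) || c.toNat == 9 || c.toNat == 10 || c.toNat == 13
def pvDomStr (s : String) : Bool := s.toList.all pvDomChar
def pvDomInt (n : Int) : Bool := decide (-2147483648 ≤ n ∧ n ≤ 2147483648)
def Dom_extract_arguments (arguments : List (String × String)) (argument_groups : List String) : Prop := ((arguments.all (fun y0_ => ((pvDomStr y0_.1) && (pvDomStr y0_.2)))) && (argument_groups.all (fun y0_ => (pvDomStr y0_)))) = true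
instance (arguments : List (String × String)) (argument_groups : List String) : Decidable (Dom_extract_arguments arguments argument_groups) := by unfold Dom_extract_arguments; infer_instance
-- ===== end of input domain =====

-- B replaces A's one-filter-pass-per-group (plus a final remaining pass) by a single pass over
-- arguments that buckets each item under its first matching group, then concatenates the buckets;
-- same values and same insertion order, a different traversal (objective: alternative).
-- ===== PORT A =====
def get_arguments (arguments : List (String × String)) (startswith : String) : PySem.Dict String String :=
  arguments.foldl
    (fun d kv => if PySem.Str.startswith kv.1 startswith then d.insert kv.1 kv.2 else d)
    PySem.Dict.empty

def extract_arguments (arguments : List (String × String)) (argument_groups : List String) : (List (String × String)) × (List (String × String)) :=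
  let found_kwargs := argument_groups.foldl
    (fun f argument_group => f.update (get_arguments arguments (PySem.Str.lower argument_group)).items)
    PySem.Dict.empty
  let remaining_kwargs := arguments.foldl
    (fun r kv => if !found_kwargs.contains kv.1 && kv.2 != "" then r.insert kv.1 kv.2 else r)
    PySem.Dict.empty
  (found_kwargs.items, remaining_kwargs.items)

-- ===== PORT B =====
def firstMatchIdx (prefixes : List String) (k : String) : Option Nat :=
  match prefixes with
  | [] => none
  | p :: ps => if PySem.Str.startswith k p then some 0 else (firstMatchIdx ps k).map (· + 1)

def extract_arguments_alt (arguments : List (String × String)) (argument_groups : List String) : (List (String × String)) × (List (String × String)) :=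
  let prefixes := argument_groups.map PySem.Str.lower
  let st := arguments.foldl
    (fun (st : List (List (String × String)) × PySem.Dict String String) kv =>
      match firstMatchIdx prefixes kv.1 with
      | some i => (st.1.modify i (fun b => b ++ [kv]), st.2)
      | none => if kv.2 != "" then (st.1, st.2.insert kv.1 kv.2) else st)
    (prefixes.map (fun _ => ([] : List (String × String))), PySem.Dict.empty)
  let found_kwargs := st.1.foldl (fun f bucket => f.update bucket) PySem.Dict.empty
  (found_kwargs.items, st.2.items)

-- ===== PRECONDITION & SPEC =====
def Spec_extract_arguments (arguments : List (String × String)) (argument_groups : List String) (out : (List (String × String)) × (List (String × String))) : Prop := out = extract_arguments_alt arguments argument_groups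
instance (arguments : List (String × String)) (argument_groups : List String) (out : (List (String × String)) × (List (String × String))) : Decidable (Spec_extract_arguments arguments argument_groups out) := by unfold Spec_extract_arguments; infer_instance

-- ===== CLAIM (what is proved, stated in full; the proofs are below) =====
def Claim_equal_extract_arguments : Prop := ∀ (arguments : List (String × String)) (argument_groups : List String), Dom_extract_arguments arguments argument_groups → Spec_extract_arguments arguments argument_groups (extract_arguments arguments argument_groups)

-- ===== LEMMAS AND PROOFS =====

-- proof-side abbreviations

-- last value stored under key k in an association list (none if k absent)
def lastVal (L : List (String × String)) (k : String) : Option String :=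
  match L with
  | [] => none
  | kv :: L => (lastVal L k).or (if kv.1 == k then some kv.2 else none)

def matchesAny (P : List String) (k : String) : Bool :=
  P.any (fun p => PySem.Str.startswith k p)

def fil (args : List (String × String)) (p : String) : List (String × String) :=
  args.filter (fun kv => PySem.Str.startswith kv.1 p)

def LA (args : List (String × String)) (P : List String) : List (String × String) :=
  (P.map (fil args)).flatten

def fib (args : List (String × String)) (P : List String) (i : Nat) : List (String × String) :=
  args.filter (fun kv => firstMatchIdx P kv.1 == some i)

def LB (args : List (String × String)) (P : List String) : List (String × String) :=
  ((List.range P.length).map (fib args P)).flatten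

-- lastVal basics

theorem lastVal_eq_none_of_not_mem (L : List (String × String)) (k : String)
    (h : k ∉ L.map Prod.fst) : lastVal L k = none := by
  induction L with
  | nil => rfl
  | cons kv L ih =>
    simp only [List.map_cons, List.mem_cons, not_or] at h
    have hne : (kv.1 == k) = false := by
      simp only [beq_eq_false_iff_ne]
      exact fun hc => h.1 hc.symm
    simp [lastVal, ih h.2, hne]

theorem lastVal_isSome_of_mem (L : List (String × String)) (kv : String × String)
    (h : kv ∈ L) : (lastVal L kv.1).isSome = true := by
  induction L with
  | nil => cases h
  | cons a L ih =>
    rcases List.mem_cons.mp h with h | h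
    · subst h; simp [lastVal, Option.isSome_or]
    · simp [lastVal, Option.isSome_or, ih h]

theorem lastVal_filter_key (L : List (String × String)) (p : String → Bool) (k : String) :
    lastVal (L.filter (fun kv => p kv.1)) k = if p k then lastVal L k else none := by
  induction L with
  | nil => simp [lastVal]
  | cons kv L ih =>
    by_cases hk : kv.1 = k
    · subst hk
      by_cases hp : p kv.1
      · simp [lastVal, hp, ih, List.filter_cons]
      · simp [lastVal, hp, ih, List.filter_cons]
    · by_cases hp : p kv.1 <;>
        simp [lastVal, hp, ih, List.filter_cons, beq_iff_eq, hk]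

theorem lastVal_eq_find? (L : List (String × String)) (k : String)
    (h : (L.map Prod.fst).Nodup) : lastVal L k = (L.find? (fun kv => kv.1 == k)).map (·.2) := by
  induction L with
  | nil => rfl
  | cons kv L ih =>
    simp only [List.map_cons, List.nodup_cons] at h
    by_cases hk : kv.1 = k
    · subst hk
      have : lastVal L kv.1 = none := lastVal_eq_none_of_not_mem L kv.1 h.1
      simp [lastVal, this, List.find?]
    · have hne : (kv.1 == k) = false := by simp [beq_iff_eq, hk]
      simp [lastVal, List.find?, hne, ih h.2]

theorem lastVal_eq_get? (d : PySem.Dict String String) (k : String)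
    (h : d.keys.Nodup) : lastVal d.items k = d.get? k := by
  have : d.keys = d.items.map Prod.fst := rfl
  rw [this] at h
  rw [lastVal_eq_find? d.items k h]
  rfl

-- update characterisations

theorem get?_update_eq (L : List (String × String)) (D : PySem.Dict String String) (k : String) :
    (D.update L).get? k = (lastVal L k).or (D.get? k) := by
  induction L generalizing D with
  | nil => simp [PySem.Dict.update, lastVal]
  | cons kv L ih =>
    have hstep : D.update (kv :: L) = (D.insert kv.1 kv.2).update L := by
      simp [PySem.Dict.update]
    rw [hstep, ih]
    rw [PySem.Dict.get?_insert]
    by_cases hk : k = kv.1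
    · subst hk
      simp [lastVal, Option.or_assoc]
    · simp [lastVal, beq_iff_eq, Ne.symm hk, hk]

theorem keys_update_eq (D : PySem.Dict String String) (L : List (String × String)) :
    (D.update L).keys = PySem.Set.update D.keys (L.map Prod.fst) := by
  have := PySem.Dict.keys_foldl_insert_key L (Prod.fst) (fun _ p => p.2) D
  simpa [PySem.Dict.update] using this

theorem set_filter_add (s : PySem.Set String) (x : String) (p : String → Bool) :
    (PySem.Set.add s x).filter p =
      if p x then PySem.Set.add (s.filter p) x else s.filter p := by
  unfold PySem.Set.add
  by_cases hx : PySem.Set.contains s x = true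
  · rw [if_pos hx]
    by_cases hp : p x
    · have hx' : x ∈ s := by
        simpa [PySem.Set.contains, List.contains_iff_mem] using hx
      have hc2 : PySem.Set.contains (s.filter p) x = true := by
        simp [PySem.Set.contains, List.contains_iff_mem, List.mem_filter, hx', hp]
      rw [if_pos hp, if_pos hc2]
    · rw [if_neg hp]
  · have hx' : x ∉ s := by
      intro hmem
      exact hx (by simpa [PySem.Set.contains, List.contains_iff_mem] using hmem)
    rw [if_neg hx, List.filter_append]
    by_cases hp : p x
    · have hcond : ¬ (PySem.Set.contains (s.filter p) x = true) := by
        simp only [PySem.Set.contains, List.contains_iff_mem]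
        intro hmem
        rw [List.mem_filter] at hmem
        exact hx' hmem.1
      rw [if_pos hp, if_neg hcond]
      simp [hp]
    · rw [if_neg hp]
      simp [hp]

theorem set_filter_foldl_add (p : String → Bool) (xs : List String) :
    ∀ (s : PySem.Set String),
      (List.foldl PySem.Set.add s xs).filter p =
        List.foldl PySem.Set.add (s.filter p) (xs.filter p) := by
  induction xs with
  | nil => intro s; simp
  | cons x xs ih =>
    intro s
    by_cases hp : p x
    · simp only [List.foldl_cons, List.filter_cons, hp, if_pos, List.foldl_cons]
      rw [ih, set_filter_add, if_pos hp]
    · simp only [List.foldl_cons, List.filter_cons, hp]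
      rw [ih, set_filter_add, if_neg (by simp [hp])]
      simp [hp]

theorem set_filter_ofList (xs : List String) (p : String → Bool) :
    (PySem.Set.ofList xs).filter p = PySem.Set.ofList (xs.filter p) := by
  have := set_filter_foldl_add p xs PySem.Set.empty
  simpa [PySem.Set.ofList, PySem.Set.empty] using this

theorem set_update_ofList (s : PySem.Set String) (xs : List String) :
    PySem.Set.update s (PySem.Set.ofList xs) = PySem.Set.update s xs := by
  rw [PySem.Set.update_eq_append_filter, PySem.Set.update_eq_append_filter,
    PySem.Set.ofList_ofList]

theorem set_contains_keys (d : PySem.Dict String String) (k : String) :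
    PySem.Set.contains d.keys k = d.contains k := by
  rw [Bool.eq_iff_iff]
  rw [PySem.Dict.contains_iff_mem_keys]
  simp [PySem.Set.contains, List.contains_iff_mem]

theorem dict_ext_keys_get? (d d' : PySem.Dict String String)
    (hd : d.keys.Nodup) (hd' : d'.keys.Nodup)
    (hk : d.keys = d'.keys) (hg : ∀ k, d.get? k = d'.get? k) : d = d' := by
  apply PySem.Dict.ext
  rw [PySem.Dict.items_eq_map_keys d hd "", PySem.Dict.items_eq_map_keys d' hd' "", hk]
  apply List.map_congr_left
  intro k _
  rw [PySem.Dict.getD_eq_get?_getD, PySem.Dict.getD_eq_get?_getD, hg]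

theorem lastVal_restrict_fresh (D : PySem.Dict String String) (L : List (String × String))
    (k : String) (hc : D.contains k = false) :
    lastVal L k = lastVal (L.filter (fun kv => !(D.contains kv.1))) k := by
  induction L with
  | nil => rfl
  | cons kv L ih =>
    by_cases hk : kv.1 = k
    · have : D.contains kv.1 = false := by rw [hk]; exact hc
      simp [lastVal, List.filter_cons, this, ih]
    · by_cases hfresh : D.contains kv.1 = false <;>
        simp_all [lastVal, List.filter_cons, beq_iff_eq, hk]

theorem update_eq_update (D : PySem.Dict String String)
    (L1 L2 : List (String × String)) (hND : D.keys.Nodup)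
    (ha : L1.filter (fun kv => !(D.contains kv.1)) = L2.filter (fun kv => !(D.contains kv.1)))
    (hb : ∀ k, D.contains k = true →
      (lastVal L1 k).or (D.get? k) = (lastVal L2 k).or (D.get? k)) :
    D.update L1 = D.update L2 := by
  apply dict_ext_keys_get?
  · exact PySem.Dict.nodup_keys_update D L1 hND
  · exact PySem.Dict.nodup_keys_update D L2 hND
  · rw [keys_update_eq, keys_update_eq,
      PySem.Set.update_eq_append_filter, PySem.Set.update_eq_append_filter]
    have hmf : ∀ (L : List (String × String)),
        (PySem.Set.ofList (L.map Prod.fst)).filter (fun y => !(PySem.Set.contains D.keys y)) =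
          PySem.Set.ofList ((L.filter (fun kv => !(D.contains kv.1))).map Prod.fst) := by
      intro L
      rw [set_filter_ofList]
      congr 1
      rw [List.filter_map]
      congr 1
      apply List.filter_congr
      intro kv _
      simp only [Function.comp_apply, set_contains_keys]
    rw [hmf, hmf, ha]
  · intro k
    rw [get?_update_eq, get?_update_eq]
    by_cases hc : D.contains k = true
    · exact hb k hc
    · have hcf : D.contains k = false := by simpa using hc
      have h1 := lastVal_restrict_fresh D L1 k hcf
      have h2 := lastVal_restrict_fresh D L2 k hcf
      rw [h1, h2, ha]

theorem update_items_update (D : PySem.Dict String String) (X : List (String × String))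
    (hND : D.keys.Nodup) :
    D.update ((PySem.Dict.empty.update X).items) = D.update X := by
  have hMn : (PySem.Dict.empty.update X).keys.Nodup :=
    PySem.Dict.nodup_keys_update _ X (by simp)
  apply dict_ext_keys_get?
  · exact PySem.Dict.nodup_keys_update D _ hND
  · exact PySem.Dict.nodup_keys_update D _ hND
  · rw [keys_update_eq, keys_update_eq]
    have h1 : (PySem.Dict.empty.update X).items.map Prod.fst = (PySem.Dict.empty.update X).keys := rfl
    have h2 : (PySem.Dict.empty.update X).keys = PySem.Set.ofList (X.map Prod.fst) := by
      rw [keys_update_eq]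
      simp [PySem.Set.ofList, PySem.Set.update, PySem.Set.empty, PySem.Dict.empty, PySem.Dict.keys]
    rw [h1, h2, set_update_ofList]
  · intro k
    rw [get?_update_eq, get?_update_eq, lastVal_eq_get? _ k hMn, get?_update_eq]
    simp

-- firstMatchIdx facts

theorem fmi_lt (P : List String) (k : String) (i : Nat)
    (h : firstMatchIdx P k = some i) : i < P.length := by
  induction P generalizing i with
  | nil => simp [firstMatchIdx] at h
  | cons p ps ih =>
    simp only [firstMatchIdx] at h
    by_cases hs : PySem.Str.startswith k p
    · rw [if_pos hs] at h
      simp only [Option.some.injEq] at h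
      simp [← h]
    · rw [if_neg hs] at h
      rw [Option.map_eq_some_iff] at h
      obtain ⟨j, hj, rfl⟩ := h
      have := ih j hj
      simp only [List.length_cons]
      omega

theorem fmi_none_iff (P : List String) (k : String) :
    firstMatchIdx P k = none ↔ matchesAny P k = false := by
  induction P with
  | nil => simp [firstMatchIdx, matchesAny]
  | cons p ps ih =>
    simp only [matchesAny, List.any_cons] at *
    simp only [firstMatchIdx]
    by_cases hs : PySem.Str.startswith k p
    · rw [if_pos hs, hs]
      simp
    · have hs' : PySem.Str.startswith k p = false := by simpa using hs
      rw [if_neg hs, hs']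
      simp only [Bool.false_or, Option.map_eq_none_iff]
      exact ih

theorem fmi_append (P : List String) (q k : String) :
    firstMatchIdx (P ++ [q]) k =
      match firstMatchIdx P k with
      | some i => some i
      | none => if PySem.Str.startswith k q then some P.length else none := by
  induction P with
  | nil => simp [firstMatchIdx]
  | cons p ps ih =>
    simp only [List.cons_append, firstMatchIdx]
    by_cases hs : PySem.Str.startswith k p
    · rw [if_pos hs, if_pos hs]
    · rw [if_neg hs, if_neg hs, ih]
      cases h : firstMatchIdx ps k with
      | some i => simp
      | none =>
        by_cases hq : PySem.Str.startswith k q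
        · have hc : PySem.Chars.startswith k.toList q.toList = true := by simpa using hq
          simp [hc]
        · have hc : PySem.Chars.startswith k.toList q.toList = false := by simpa using hq
          simp [hc]

theorem matchesAny_append (P : List String) (q k : String) :
    matchesAny (P ++ [q]) k = (matchesAny P k || PySem.Str.startswith k q) := by
  simp [matchesAny]

-- list decompositions

theorem LA_append (args : List (String × String)) (P : List String) (q : String) :
    LA args (P ++ [q]) = LA args P ++ fil args q := by
  simp [LA]

theorem fib_append_of_lt (args : List (String × String)) (P : List String) (q : String)
    (i : Nat) (hi : i < P.length) :
    fib args (P ++ [q]) i = fib args P i := by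
  apply List.filter_congr
  intro kv _
  rw [fmi_append]
  cases h : firstMatchIdx P kv.1 with
  | some j => simp
  | none =>
    by_cases hq : PySem.Str.startswith kv.1 q
    · rw [if_pos hq]
      have hne : ¬ (P.length = i) := by omega
      simp [hne]
    · rw [if_neg hq]

theorem fib_append_last (args : List (String × String)) (P : List String) (q : String) :
    fib args (P ++ [q]) P.length =
      args.filter (fun kv => (firstMatchIdx P kv.1).isNone && PySem.Str.startswith kv.1 q) := by
  apply List.filter_congr
  intro kv _
  rw [fmi_append]
  cases h : firstMatchIdx P kv.1 with
  | some j =>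
    have := fmi_lt P kv.1 j h
    have hne : ¬ (j = P.length) := by omega
    simp [hne]
  | none =>
    by_cases hq : PySem.Str.startswith kv.1 q
    · rw [if_pos hq, hq]
      simp
    · have hq' : PySem.Str.startswith kv.1 q = false := by simpa using hq
      rw [if_neg hq, hq']
      simp

theorem LB_append (args : List (String × String)) (P : List String) (q : String) :
    LB args (P ++ [q]) = LB args P ++
      args.filter (fun kv => (firstMatchIdx P kv.1).isNone && PySem.Str.startswith kv.1 q) := by
  unfold LB
  rw [List.length_append, List.length_singleton, List.range_succ, List.map_append,
    List.flatten_append]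
  congr 1
  · congr 1
    apply List.map_congr_left
    intro i hi
    exact fib_append_of_lt args P q i (List.mem_range.mp hi)
  · simp [fib_append_last]

theorem update_append (D : PySem.Dict String String) (X Y : List (String × String)) :
    D.update (X ++ Y) = (D.update X).update Y := by
  simp [PySem.Dict.update, List.foldl_append]

theorem empty_keys_nodup : (PySem.Dict.empty : PySem.Dict String String).keys.Nodup := by
  simp

theorem get?_LA (args : List (String × String)) :
    ∀ (P : List String) (k : String),
      (PySem.Dict.empty.update (LA args P)).get? k =
        if matchesAny P k then lastVal args k else none := by
  intro P
  induction P using List.reverseRecOn with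
  | nil =>
    intro k
    simp [LA, matchesAny, PySem.Dict.update]
  | append_singleton P q ih =>
    intro k
    rw [LA_append, update_append, get?_update_eq]
    have hfil : lastVal (fil args q) k =
        if PySem.Str.startswith k q then lastVal args k else none := by
      unfold fil
      exact lastVal_filter_key args (fun s => PySem.Str.startswith s q) k
    rw [hfil, ih k, matchesAny_append]
    by_cases hm : matchesAny P k
    · rw [hm]
      by_cases hs : PySem.Str.startswith k q
      · rw [if_pos hs, if_pos rfl]
        simp only [Bool.true_or, if_pos]
        cases lastVal args k <;> rfl
      · rw [if_neg hs, if_pos rfl]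
        simp [Option.none_or]
    · have hm' : matchesAny P k = false := by simpa using hm
      rw [hm']
      by_cases hs : PySem.Str.startswith k q
      · rw [if_pos hs, hs]
        simp
      · have hs' : PySem.Str.startswith k q = false := by simpa using hs
        rw [if_neg hs, hs']
        simp

theorem contains_LA (args : List (String × String)) (P : List String)
    (kv : String × String) (hkv : kv ∈ args) :
    (PySem.Dict.empty.update (LA args P)).contains kv.1 = matchesAny P kv.1 := by
  rw [PySem.Dict.contains_eq_isSome_get?, get?_LA args P kv.1]
  by_cases hm : matchesAny P kv.1
  · simp [hm, lastVal_isSome_of_mem args kv hkv]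
  · simp [hm]

theorem dict_AB (args : List (String × String)) :
    ∀ P : List String,
      PySem.Dict.empty.update (LA args P) = PySem.Dict.empty.update (LB args P) := by
  intro P
  induction P using List.reverseRecOn with
  | nil => rfl
  | append_singleton P q ih =>
    have hND : (PySem.Dict.empty.update (LA args P)).keys.Nodup :=
      PySem.Dict.nodup_keys_update _ _ empty_keys_nodup
    rw [LA_append, LB_append, update_append, update_append, ← ih]
    apply update_eq_update _ _ _ hND
    · -- fresh entries coincide
      unfold fil
      rw [List.filter_filter, List.filter_filter]
      apply List.filter_congr
      intro kv hkv
      rw [contains_LA args P kv hkv]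
      have hi : (firstMatchIdx P kv.1).isNone = !(matchesAny P kv.1) := by
        cases hmi : firstMatchIdx P kv.1 with
        | some j =>
          have hm : matchesAny P kv.1 = true := by
            by_contra hmf
            have : matchesAny P kv.1 = false := by simpa using hmf
            rw [← fmi_none_iff] at this
            rw [this] at hmi
            simp at hmi
          simp [hm]
        | none =>
          have hx := (fmi_none_iff P kv.1).mp hmi
          simp [hx]
      rw [hi]
      cases matchesAny P kv.1 <;> simp
    · -- stale keys keep their value
      intro k hc
      have hg := get?_LA args P k
      have hm : matchesAny P k = true := by
        by_contra hmf
        have : matchesAny P k = false := by simpa using hmf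
        rw [PySem.Dict.contains_eq_isSome_get?, hg, this] at hc
        simp at hc
      rw [hg, hm, if_pos rfl]
      have hfil : lastVal (fil args q) k =
          if PySem.Str.startswith k q then lastVal args k else none := by
        unfold fil
        exact lastVal_filter_key args (fun s => PySem.Str.startswith s q) k
      have hnf : lastVal (args.filter
          (fun kv => (firstMatchIdx P kv.1).isNone && PySem.Str.startswith kv.1 q)) k =
          if (firstMatchIdx P k).isNone && PySem.Str.startswith k q then lastVal args k
          else none := by
        exact lastVal_filter_key args
          (fun s => (firstMatchIdx P s).isNone && PySem.Str.startswith s q) k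
      have hfnone : (firstMatchIdx P k).isNone = false := by
        cases hmi : firstMatchIdx P k with
        | some j => simp
        | none =>
          rw [fmi_none_iff] at hmi
          simp [hmi] at hm
      rw [hfil, hnf, hfnone]
      simp only [Bool.false_and, Bool.false_eq_true, if_false]
      by_cases hs : PySem.Str.startswith k q
      · rw [if_pos hs]
        cases lastVal args k <;> rfl
      · rw [if_neg hs]


theorem get_arguments_eq (args : List (String × String)) (sw : String) :
    get_arguments args sw = PySem.Dict.empty.update (fil args sw) := by
  unfold get_arguments fil PySem.Dict.update
  rw [List.foldl_filter]

theorem foundA_eq (args : List (String × String)) :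
    ∀ (groups : List String) (D : PySem.Dict String String), D.keys.Nodup →
      groups.foldl
        (fun f argument_group =>
          f.update (get_arguments args (PySem.Str.lower argument_group)).items) D =
      D.update (LA args (groups.map PySem.Str.lower)) := by
  intro groups
  induction groups with
  | nil => intro D _; simp [LA, PySem.Dict.update]
  | cons g gs ih =>
    intro D hND
    rw [List.foldl_cons, get_arguments_eq, update_items_update D _ hND, List.map_cons]
    have hstep : LA args (PySem.Str.lower g :: gs.map PySem.Str.lower) =
        fil args (PySem.Str.lower g) ++ LA args (gs.map PySem.Str.lower) := by
      simp [LA]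
    rw [ih (D.update (fil args (PySem.Str.lower g)))
      (PySem.Dict.nodup_keys_update _ _ hND), hstep, update_append]

theorem bucket_fold (P : List String) (args : List (String × String)) :
    ∀ (bs : List (List (String × String))) (r : PySem.Dict String String),
      bs.length = P.length →
      args.foldl
        (fun (st : List (List (String × String)) × PySem.Dict String String) kv =>
          match firstMatchIdx P kv.1 with
          | some i => (st.1.modify i (fun b => b ++ [kv]), st.2)
          | none => if kv.2 != "" then (st.1, st.2.insert kv.1 kv.2) else st)
        (bs, r) =
      (bs.zipIdx.map (fun bi => bi.1 ++ args.filter (fun kv => firstMatchIdx P kv.1 == some bi.2)),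
       r.update (args.filter (fun kv => (firstMatchIdx P kv.1).isNone && kv.2 != ""))) := by
  induction args with
  | nil =>
    intro bs r _
    simp only [List.foldl_nil, List.filter_nil, List.append_nil, Prod.mk.injEq]
    constructor
    · apply List.ext_getElem
      · simp
      · intro j h1 h2
        simp
    · rfl
  | cons kv args ih =>
    intro bs r h
    rw [List.foldl_cons]
    cases hfmi : firstMatchIdx P kv.1 with
    | some i =>
      have hi : i < bs.length := by rw [h]; exact fmi_lt P kv.1 i hfmi
      simp only [hfmi]
      rw [ih (bs.modify i (fun b => b ++ [kv])) r (by simp [h])]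
      simp only [Prod.mk.injEq]
      constructor
      · apply List.ext_getElem
        · simp
        · intro j h1 h2
          simp only [List.getElem_map, List.getElem_zipIdx, List.getElem_modify,
            List.filter_cons, hfmi, Nat.zero_add]
          by_cases hij : i = j
          · subst hij
            simp [List.append_assoc]
          · have : (firstMatchIdx P kv.1 == some j) = false := by
              simp [hfmi, hij]
            simp [hij, this, hfmi]
      · have : ((firstMatchIdx P kv.1).isNone && kv.2 != "") = false := by
          simp [hfmi]
        rw [List.filter_cons, this]
        simp
    | none =>
      by_cases hv : kv.2 != ""
      · simp only [hfmi, hv, if_pos]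
        rw [ih bs (r.insert kv.1 kv.2) h]
        simp only [Prod.mk.injEq]
        constructor
        · apply List.map_congr_left
          intro bi _
          congr 1
          rw [List.filter_cons]
          simp [hfmi]
        · have : ((firstMatchIdx P kv.1).isNone && kv.2 != "") = true := by
            simp [hfmi, hv]
          rw [List.filter_cons, this]
          simp [PySem.Dict.update]
      · simp only [hfmi, hv, if_neg, Bool.false_eq_true, not_false_eq_true]
        rw [ih bs r h]
        simp only [Prod.mk.injEq]
        constructor
        · apply List.map_congr_left
          intro bi _
          congr 1
          rw [List.filter_cons]
          simp [hfmi]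
        · have hcond : ((firstMatchIdx P kv.1).isNone && kv.2 != "") = false := by
            simp only [hfmi, Option.isNone_none, Bool.true_and]
            simpa using hv
          rw [List.filter_cons]
          simp [hcond]

theorem isNone_fmi (P : List String) (k : String) :
    (firstMatchIdx P k).isNone = !(matchesAny P k) := by
  cases hmi : firstMatchIdx P k with
  | some j =>
    have hm : matchesAny P k = true := by
      by_contra hmf
      have : matchesAny P k = false := by simpa using hmf
      rw [← fmi_none_iff] at this
      rw [this] at hmi
      simp at hmi
    simp [hm]
  | none =>
    have hx := (fmi_none_iff P k).mp hmi
    simp [hx]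

theorem buckets_shape (args : List (String × String)) (P : List String) :
    ((P.map (fun _ => ([] : List (String × String)))).zipIdx.map
      (fun bi => bi.1 ++ args.filter (fun kv => firstMatchIdx P kv.1 == some bi.2))) =
    (List.range P.length).map (fib args P) := by
  apply List.ext_getElem
  · simp
  · intro j h1 h2
    simp [List.getElem_zipIdx, fib]

theorem foldl_update_eq_update_flatten (bs : List (List (String × String)))
    (D : PySem.Dict String String) :
    bs.foldl (fun f bucket => f.update bucket) D = D.update bs.flatten := by
  simp [PySem.Dict.update, List.foldl_flatten]

theorem foldl_insert_if (p : (String × String) → Bool) (args : List (String × String))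
    (D : PySem.Dict String String) :
    args.foldl (fun r kv => if p kv then r.insert kv.1 kv.2 else r) D =
      D.update (args.filter p) := by
  unfold PySem.Dict.update
  rw [List.foldl_filter]

theorem pred_eq (args : List (String × String)) (P : List String) :
    args.filter (fun kv =>
      !((PySem.Dict.empty.update (LA args P)).contains kv.1) && kv.2 != "") =
    args.filter (fun kv => (firstMatchIdx P kv.1).isNone && kv.2 != "") := by
  apply List.filter_congr
  intro kv hkv
  rw [contains_LA args P kv hkv, isNone_fmi]

-- ===== VERDICT (by name: the statement is the Claim_ definition above) =====
theorem extract_arguments_spec : Claim_equal_extract_arguments := by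
  unfold Claim_equal_extract_arguments
  intro arguments argument_groups _
  unfold Spec_extract_arguments
  simp only [extract_arguments, extract_arguments_alt]
  rw [foundA_eq arguments argument_groups PySem.Dict.empty empty_keys_nodup]
  rw [bucket_fold (argument_groups.map PySem.Str.lower) arguments
    ((argument_groups.map PySem.Str.lower).map (fun _ => ([] : List (String × String))))
    PySem.Dict.empty (by simp)]
  rw [foldl_insert_if
    (fun kv => !((PySem.Dict.empty.update
      (LA arguments (argument_groups.map PySem.Str.lower))).contains kv.1) && kv.2 != "")
    arguments PySem.Dict.empty]
  rw [pred_eq arguments (argument_groups.map PySem.Str.lower)]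
  rw [buckets_shape arguments (argument_groups.map PySem.Str.lower)]
  rw [foldl_update_eq_update_flatten]
  have hLB : ((List.range (argument_groups.map PySem.Str.lower).length).map
      (fib arguments (argument_groups.map PySem.Str.lower))).flatten =
      LB arguments (argument_groups.map PySem.Str.lower) := rfl
  rw [hLB, dict_AB arguments (argument_groups.map PySem.Str.lower)]
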